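-- pv_equiv track=rewrite | github.com/Howardlei123/Novelty_Assessment_Documentation | examples/rocscript.py | align_labels
-- ===== SOURCE A (Python) =====
-- window_size = 9
--
-- def align_labels(predicted_labels, true_labels, window_size):
--     """
--     Adjusts the true labels to align with the predicted labels if the predicted labels are delayed
--     but correct within a specified window size.
--     """
--     visited = [0] * len(predicted_labels) # Record previously modified true_labels to prevent double mapping
--     paired = [0] * len(predicted_labels) # Record originally matching signals to prevent random alterations
--     # Ensure the lists are of equal length
--     if len(predicted_labels) != len(true_labels):
--         raise ValueError("The length of predicted_labels and true_labels must be the same.")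
--
--     adjusted_true_labels = true_labels.copy()
--
--     # Iterate over the predicted labels
--     for i, pred_label in enumerate(predicted_labels):
--         if pred_label == 1 and true_labels[i] == 1:
--             paired[i] = 1;
--         elif pred_label == 1 and true_labels[i] == 0:
--             # Check for a matching true label within the window size
--             for j in range(max(0, i - window_size), i):
--                 if true_labels[j] == 1 and visited[j] == 0 and paired[j] == 0:
--                     visited[j] = 1
--                     # Adjust the true label to align with the predicted label
--                     adjusted_true_labels[j] = 0
--                     adjusted_true_labels[i] = 1
--                     break
--
--     return adjusted_true_labels
-- ===== SOURCE B (Python) =====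
-- def align_labels(predicted_labels, true_labels, window_size):
--     """Two-pointer rewrite: precompute candidate positions once; a monotone
--     pointer replaces A's inner window scan."""
--     if len(predicted_labels) != len(true_labels):
--         raise ValueError("The length of predicted_labels and true_labels must be the same.")
--     adjusted = list(true_labels)
--     # candidate donors: true=1 positions not already paired with a prediction
--     cands = [j for j in range(len(true_labels))
--              if true_labels[j] == 1 and predicted_labels[j] != 1]
--     ptr = 0
--     for i, p in enumerate(predicted_labels):
--         if p == 1 and true_labels[i] == 0:
--             lb = i - window_size
--             while ptr < len(cands) and cands[ptr] < lb:
--                 ptr += 1  # expired: window lower bound only grows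
--             if ptr < len(cands) and cands[ptr] < i:
--                 adjusted[cands[ptr]] = 0
--                 adjusted[i] = 1
--                 ptr += 1
--     return adjusted
-- ===== Notes on version B (the rewrite author's own statement) =====
-- stated objective: alternative
-- what changed: Replaced A's per-prediction backward window scan (with visited/paired bookkeeping arrays) by a single precomputed sorted list of candidate donor positions consumed left-to-right with one monotone pointer, exploiting that the window's lower bound only grows.
import Mathlib
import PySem

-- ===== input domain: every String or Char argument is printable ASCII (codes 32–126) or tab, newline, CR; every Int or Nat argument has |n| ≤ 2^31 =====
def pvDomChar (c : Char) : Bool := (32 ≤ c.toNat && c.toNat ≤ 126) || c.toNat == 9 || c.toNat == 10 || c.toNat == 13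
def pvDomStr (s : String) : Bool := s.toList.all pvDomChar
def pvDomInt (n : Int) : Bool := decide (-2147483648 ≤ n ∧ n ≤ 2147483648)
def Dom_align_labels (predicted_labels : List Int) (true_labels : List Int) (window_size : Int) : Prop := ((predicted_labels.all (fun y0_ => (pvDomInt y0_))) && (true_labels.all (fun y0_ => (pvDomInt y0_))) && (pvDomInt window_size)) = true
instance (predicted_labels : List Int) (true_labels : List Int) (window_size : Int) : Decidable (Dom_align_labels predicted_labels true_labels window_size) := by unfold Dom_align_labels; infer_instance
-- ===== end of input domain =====

-- B replaces A's per-prediction backward window scan (with visited/paired arrays) by a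
-- precomputed sorted candidate list consumed with one monotone pointer.

-- ===== PORT A =====
-- one step of A's outer loop: state = (visited, paired, adjusted_true_labels), item = (i, pred_label);
-- the inner 'for j … break' is the first j in range(max(0,i-w), i) passing the test, i.e. List.find?.
def pvStepA (true_labels : List Int) (window_size : Int)
    (st : List Int × List Int × List Int) (ip : Int × Int) : List Int × List Int × List Int :=
  let vis := st.1; let par := st.2.1; let adj := st.2.2
  let i := ip.1; let p := ip.2
  if p = 1 ∧ PySem.List.pyGetD true_labels i 0 = 1 then
    (vis, PySem.List.pySetD par i 1, adj)
  else if p = 1 ∧ PySem.List.pyGetD true_labels i 0 = 0 then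
    match (PySem.List.pyRange (max 0 (i - window_size)) i 1).find?
        (fun j => decide (PySem.List.pyGetD true_labels j 0 = 1 ∧
                          PySem.List.pyGetD vis j 0 = 0 ∧
                          PySem.List.pyGetD par j 0 = 0)) with
    | some j => (PySem.List.pySetD vis j 1, par,
                 PySem.List.pySetD (PySem.List.pySetD adj j 0) i 1)
    | none => (vis, par, adj)
  else (vis, par, adj)

def align_labels (predicted_labels : List Int) (true_labels : List Int) (window_size : Int) : List Int :=
  if predicted_labels.length ≠ true_labels.length then []  -- Python raises ValueError here; excluded by Pre_
  else
    ((PySem.List.enumerate predicted_labels 0).foldl (pvStepA true_labels window_size)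
      (List.replicate predicted_labels.length 0, List.replicate predicted_labels.length 0,
       true_labels)).2.2

-- ===== PORT B =====
-- candidate donor positions: true label 1 and not already paired with a prediction
def pvCands (predicted_labels : List Int) (true_labels : List Int) : List Int :=
  (PySem.List.pyRange 0 true_labels.length 1).filter
    (fun j => decide (PySem.List.pyGetD true_labels j 0 = 1 ∧
                      PySem.List.pyGetD predicted_labels j 0 ≠ 1))

-- one step of B's loop: state = (remaining candidate suffix ~ the pointer, adjusted), item = (i, p)
def pvStepB (true_labels : List Int) (window_size : Int)
    (st : List Int × List Int) (ip : Int × Int) : List Int × List Int :=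
  let cs := st.1; let adj := st.2
  let i := ip.1; let p := ip.2
  if p = 1 ∧ PySem.List.pyGetD true_labels i 0 = 0 then
    let cs' := cs.dropWhile (fun j => decide (j < i - window_size))
    match cs' with
    | [] => ([], adj)
    | j :: rest =>
        if j < i then (rest, PySem.List.pySetD (PySem.List.pySetD adj j 0) i 1)
        else (cs', adj)
  else (cs, adj)

def align_labels_alt (predicted_labels : List Int) (true_labels : List Int) (window_size : Int) : List Int :=
  if predicted_labels.length ≠ true_labels.length then []  -- Source B raises ValueError here; excluded by Pre_
  else
    ((PySem.List.enumerate predicted_labels 0).foldl (pvStepB true_labels window_size)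
      (pvCands predicted_labels true_labels, true_labels)).2

-- ===== PRECONDITION & SPEC =====
-- A (and B) raise ValueError when the two lists have different lengths; Pre_ excludes exactly that.
def Pre_align_labels (predicted_labels : List Int) (true_labels : List Int) (window_size : Int) : Prop :=
  predicted_labels.length = true_labels.length
instance (predicted_labels : List Int) (true_labels : List Int) (window_size : Int) : Decidable (Pre_align_labels predicted_labels true_labels window_size) := by unfold Pre_align_labels; infer_instance
def pvWitness_align_labels : List Int × List Int × Int := ([1, 0, 1], [0, 1, 0], 9)

def Spec_align_labels (predicted_labels : List Int) (true_labels : List Int) (window_size : Int) (out : List Int) : Prop := out = align_labels_alt predicted_labels true_labels window_size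
instance (predicted_labels : List Int) (true_labels : List Int) (window_size : Int) (out : List Int) : Decidable (Spec_align_labels predicted_labels true_labels window_size out) := by unfold Spec_align_labels; infer_instance

-- ===== CLAIM (what is proved, stated in full; the proofs are below) =====
def Claim_equal_align_labels : Prop := ∀ (predicted_labels : List Int) (true_labels : List Int) (window_size : Int), Dom_align_labels predicted_labels true_labels window_size → Pre_align_labels predicted_labels true_labels window_size → Spec_align_labels predicted_labels true_labels window_size (align_labels predicted_labels true_labels window_size)

-- ===== LEMMAS AND PROOFS =====

-- get-after-set for nonnegative Int indices
lemma pvGetSetD (xs : List Int) (i m v d : Int) (h0 : 0 ≤ i) (hm : 0 ≤ m)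
    (h : i < xs.length) :
    PySem.List.pyGetD (PySem.List.pySetD xs i v) m d =
      if m = i then v else PySem.List.pyGetD xs m d := by
  lift i to ℕ using h0 with ni
  lift m to ℕ using hm with nm
  have := PySem.List.pyGetD_pySetD_natCast xs ni nm v d (by exact_mod_cast h)
  simpa [Nat.cast_inj] using this

lemma pvMemCands (pl tl : List Int) (x : Int) :
    x ∈ pvCands pl tl ↔ 0 ≤ x ∧ x < tl.length ∧
      PySem.List.pyGetD tl x 0 = 1 ∧ PySem.List.pyGetD pl x 0 ≠ 1 := by
  simp [pvCands, List.mem_filter, PySem.List.mem_pyRange_one, and_assoc]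

lemma pvCandsPairwise (pl tl : List Int) : (pvCands pl tl).Pairwise (· < ·) :=
  (PySem.List.pairwise_lt_pyRange_one 0 tl.length).filter _

-- find? over an increasing integer range: none when nothing qualifies
lemma pvFindNone (a b : Int) (p : Int → Bool)
    (h : ∀ y, a ≤ y → y < b → p y = false) :
    (PySem.List.pyRange a b 1).find? p = none := by
  apply List.find?_eq_none.mpr
  intro x hx
  rw [PySem.List.mem_pyRange_one] at hx
  simp [h x hx.1 hx.2]

-- find? over an increasing integer range returns the minimum qualifying element
lemma pvFindMin (p : Int → Bool) (x : Int) (d : Nat) : ∀ a b : Int, (x - a).toNat = d →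
    a ≤ x → x < b → p x = true → (∀ y, a ≤ y → y < x → p y = false) →
    (PySem.List.pyRange a b 1).find? p = some x := by
  induction d with
  | zero =>
      intro a b hd hax hxb hpx _
      have hax' : a = x := by omega
      subst hax'
      rw [PySem.List.pyRange_one_cons hxb]
      simp [List.find?, hpx]
  | succ d ih =>
      intro a b hd hax hxb hpx hmin
      have halt : a < x := by omega
      rw [PySem.List.pyRange_one_cons (lt_trans halt hxb)]
      rw [List.find?_cons_of_neg (by simp [hmin a le_rfl halt])]
      exact ih (a + 1) b (by omega) (by omega) hxb hpx
        (fun y hy hyx => hmin y (by omega) hyx)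

lemma pvDropWhileHead {p : Int → Bool} : ∀ (l : List Int) {j : Int} {rest : List Int},
    l.dropWhile p = j :: rest → p j = false := by
  intro l
  induction l with
  | nil => intro j rest h; simp [List.dropWhile] at h
  | cons a t ih =>
      intro j rest h
      by_cases hpa : p a = true
      · rw [List.dropWhile_cons_of_pos hpa] at h; exact ih h
      · rw [List.dropWhile_cons_of_neg (by simpa using hpa)] at h
        cases h; simpa using hpa

-- the coupling invariant between A's state (vis, par, adjA) and B's state (cs, adjB)
-- after the first k indices have been processed
def pvInv (pl tl : List Int) (w : Int) (k : Nat)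
    (vis par adjA cs adjB : List Int) : Prop :=
  adjA = adjB ∧
  vis.length = tl.length ∧ par.length = tl.length ∧ adjA.length = tl.length ∧
  (∀ j : Int, 0 ≤ j → j < tl.length →
      PySem.List.pyGetD par j 0 =
        if j < (k : Int) ∧ PySem.List.pyGetD pl j 0 = 1 ∧ PySem.List.pyGetD tl j 0 = 1
        then 1 else 0) ∧
  ∃ D : List Int,
    pvCands pl tl = D ++ cs ∧
    (∀ j ∈ cs, PySem.List.pyGetD vis j 0 = 0) ∧
    (∀ j ∈ D, PySem.List.pyGetD vis j 0 ≠ 0 ∨ j < (k : Int) - w) ∧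
    (∀ j : Int, 0 ≤ j → j < tl.length → PySem.List.pyGetD vis j 0 ≠ 0 → j ∈ D)

-- the coupled step: one index k advances both machines and preserves the invariant
lemma pvStep (pl tl : List Int) (w : Int) (k : Nat) (p : Int)
    (hlen : pl.length = tl.length) (hk : k < pl.length) (hp : pl.getD k 0 = p)
    (vis par adjA cs adjB : List Int)
    (hinv : pvInv pl tl w k vis par adjA cs adjB) :
    pvInv pl tl w (k + 1)
      (pvStepA tl w (vis, par, adjA) ((k : Int), p)).1
      (pvStepA tl w (vis, par, adjA) ((k : Int), p)).2.1
      (pvStepA tl w (vis, par, adjA) ((k : Int), p)).2.2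
      (pvStepB tl w (cs, adjB) ((k : Int), p)).1
      (pvStepB tl w (cs, adjB) ((k : Int), p)).2 := by
  obtain ⟨hadj, hvl, hparl, hal, hpar, D, hC, hcsvis, hDvis, hvisD⟩ := hinv
  subst hadj
  have hkn : (k : Int) < (tl.length : Int) := by
    rw [← hlen]; exact_mod_cast hk
  have hplk : PySem.List.pyGetD pl ((k : Nat) : Int) 0 = p := by
    rw [PySem.List.pyGetD_natCast]; exact hp
  have hCnn : ∀ j ∈ pvCands pl tl, 0 ≤ j := fun j hj => ((pvMemCands pl tl j).mp hj).1
  -- par-characterisation carries over to k+1 when index k is not a pair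
  have parExt : ¬ (PySem.List.pyGetD pl ((k : Nat) : Int) 0 = 1 ∧
                   PySem.List.pyGetD tl ((k : Nat) : Int) 0 = 1) →
      ∀ j : Int, 0 ≤ j → j < tl.length →
        PySem.List.pyGetD par j 0 =
          if j < ((k + 1 : Nat) : Int) ∧ PySem.List.pyGetD pl j 0 = 1 ∧
             PySem.List.pyGetD tl j 0 = 1 then 1 else 0 := by
    intro hnk j h0 hj
    rw [hpar j h0 hj]
    by_cases hP : PySem.List.pyGetD pl j 0 = 1 ∧ PySem.List.pyGetD tl j 0 = 1
    · rcases eq_or_ne j ((k : Nat) : Int) with rfl | hne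
      · rw [if_neg (by rintro ⟨h, -⟩; omega), if_neg (by rintro ⟨-, h⟩; exact hnk h)]
      · by_cases hlt : j < ((k : Nat) : Int)
        · rw [if_pos ⟨hlt, hP⟩, if_pos ⟨by push_cast at hlt ⊢; omega, hP⟩]
        · rw [if_neg (fun h => hlt h.1),
            if_neg (by rintro ⟨h, -⟩; push_cast at h; omega)]
    · rw [if_neg (fun h => hP h.2), if_neg (fun h => hP h.2)]
  have dWeak : ∀ j ∈ D, PySem.List.pyGetD vis j 0 ≠ 0 ∨ j < ((k + 1 : Nat) : Int) - w :=
    fun j hj => (hDvis j hj).imp_right (fun h => by push_cast at h ⊢; omega)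
  by_cases hp1 : p = 1
  · by_cases htl1 : PySem.List.pyGetD tl ((k : Nat) : Int) 0 = 1
    · -- pair branch: A records paired[k]; B does nothing
      have hA : pvStepA tl w (vis, par, adjA) ((k : Int), p) =
          (vis, PySem.List.pySetD par ((k : Nat) : Int) 1, adjA) := by
        simp only [pvStepA]; rw [if_pos ⟨hp1, htl1⟩]
      have hB : pvStepB tl w (cs, adjA) ((k : Int), p) = (cs, adjA) := by
        simp only [pvStepB]
        rw [if_neg (by rintro ⟨-, h0⟩; rw [htl1] at h0; norm_num at h0)]
      rw [hA, hB]
      refine ⟨rfl, hvl, by simp [hparl], hal, ?_, D, hC,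
        hcsvis, dWeak, hvisD⟩
      intro j h0 hj
      rw [pvGetSetD par ((k : Nat) : Int) j 1 0 (by positivity) h0 (by rw [hparl]; exact hkn)]
      rcases eq_or_ne j ((k : Nat) : Int) with rfl | hne
      · rw [if_pos rfl, if_pos ⟨by push_cast; omega, by rw [hplk]; exact hp1, htl1⟩]
      · rw [if_neg hne, hpar j h0 hj]
        by_cases hP : PySem.List.pyGetD pl j 0 = 1 ∧ PySem.List.pyGetD tl j 0 = 1
        · by_cases hlt : j < ((k : Nat) : Int)
          · rw [if_pos ⟨hlt, hP⟩, if_pos ⟨by push_cast at hlt ⊢; omega, hP⟩]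
          · rw [if_neg (fun h => hlt h.1),
              if_neg (by rintro ⟨h, -⟩; push_cast at h; omega)]
        · rw [if_neg (fun h => hP h.2), if_neg (fun h => hP h.2)]
    · by_cases htl0 : PySem.List.pyGetD tl ((k : Nat) : Int) 0 = 0
      · -- trigger branch
        have hc1 : ¬ (p = 1 ∧ PySem.List.pyGetD tl ((k : Nat) : Int) 0 = 1) := by
          rintro ⟨-, h⟩; exact htl1 h
        have hsplit : cs.takeWhile (fun j => decide (j < (k : Int) - w)) ++
            cs.dropWhile (fun j => decide (j < (k : Int) - w)) = cs :=
          List.takeWhile_append_dropWhile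
        have hCsplit : pvCands pl tl =
            (D ++ cs.takeWhile (fun j => decide (j < (k : Int) - w))) ++
            cs.dropWhile (fun j => decide (j < (k : Int) - w)) := by
          rw [hC, List.append_assoc]
          exact congrArg (fun x => D ++ x) hsplit.symm
        have ht : ∀ j ∈ cs.takeWhile (fun j => decide (j < (k : Int) - w)),
            j < (k : Int) - w := fun j hj => by simpa using List.mem_takeWhile_imp hj
        have haux : ∀ j ∈ cs.dropWhile (fun j => decide (j < (k : Int) - w)), j ∈ cs :=
          fun j hj => by rw [← hsplit]; exact List.mem_append_right _ hj
        have hPW : (cs.dropWhile (fun j => decide (j < (k : Int) - w))).Pairwise (· < ·) := by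
          have := pvCandsPairwise pl tl
          rw [hCsplit] at this
          exact (List.pairwise_append.mp this).2.1
        -- any position passing A's inner test lies in the dropped-to suffix
        have hcand : ∀ y : Int, max 0 ((k : Int) - w) ≤ y → y < (k : Int) →
            PySem.List.pyGetD tl y 0 = 1 → PySem.List.pyGetD vis y 0 = 0 →
            PySem.List.pyGetD par y 0 = 0 →
            y ∈ cs.dropWhile (fun j => decide (j < (k : Int) - w)) := by
          intro y hlb hyk htl hvis hparz
          have h0 : 0 ≤ y := le_trans (le_max_left _ _) hlb
          have hwy : (k : Int) - w ≤ y := le_trans (le_max_right _ _) hlb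
          have hyn : y < (tl.length : Int) := by omega
          have hplne : PySem.List.pyGetD pl y 0 ≠ 1 := by
            intro hpl1
            have hh := hpar y h0 hyn
            rw [if_pos ⟨hyk, hpl1, htl⟩, hparz] at hh
            norm_num at hh
          have hyC : y ∈ pvCands pl tl := (pvMemCands pl tl y).mpr ⟨h0, hyn, htl, hplne⟩
          rw [hCsplit] at hyC
          rcases List.mem_append.mp hyC with hyD | hcs'
          · rcases List.mem_append.mp hyD with hyD | hyt
            · rcases hDvis y hyD with hne | hexp
              · exact absurd hvis hne
              · omega
            · have := ht y hyt; omega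
          · exact hcs'
        rcases hdwe : cs.dropWhile (fun j => decide (j < (k : Int) - w)) with _ | ⟨j0, rest⟩
        · -- no candidate left at all
          have hfind : (PySem.List.pyRange (max 0 ((k : Int) - w)) (k : Int) 1).find?
              (fun j => decide (PySem.List.pyGetD tl j 0 = 1 ∧
                PySem.List.pyGetD vis j 0 = 0 ∧ PySem.List.pyGetD par j 0 = 0)) = none := by
            apply pvFindNone
            intro y hy1 hy2
            rw [decide_eq_false_iff_not]
            rintro ⟨h1, h2, h3⟩
            have := hcand y hy1 hy2 h1 h2 h3
            rw [hdwe] at this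
            simp at this
          have hA : pvStepA tl w (vis, par, adjA) ((k : Int), p) = (vis, par, adjA) := by
            simp only [pvStepA]; rw [if_neg hc1, if_pos ⟨hp1, htl0⟩, hfind]
          have hB : pvStepB tl w (cs, adjA) ((k : Int), p) = ([], adjA) := by
            simp only [pvStepB]; rw [if_pos ⟨hp1, htl0⟩, hdwe]
          rw [hA, hB]
          refine ⟨rfl, hvl, hparl, hal, parExt (by rintro ⟨-, h⟩; exact htl1 h),
            D ++ cs.takeWhile (fun j => decide (j < (k : Int) - w)),
            by rw [hCsplit, hdwe], by simp, ?_,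
            fun j h0 hj hne => List.mem_append_left _ (hvisD j h0 hj hne)⟩
          intro j hj
          rcases List.mem_append.mp hj with hjD | hjt
          · exact dWeak j hjD
          · right; have := ht j hjt; push_cast; omega
        · have hj0ge : (k : Int) - w ≤ j0 := by
            have := pvDropWhileHead cs hdwe
            simpa using this
          have hj0cs : j0 ∈ cs := haux j0 (by rw [hdwe]; exact List.mem_cons_self ..)
          have hj0C : j0 ∈ pvCands pl tl := by
            rw [hCsplit, hdwe]
            exact List.mem_append_right _ (List.mem_cons_self ..)
          obtain ⟨hj0nn, hj0n, hj0tl, hj0pl⟩ := (pvMemCands pl tl j0).mp hj0C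
          have hj0vis : PySem.List.pyGetD vis j0 0 = 0 := hcsvis j0 hj0cs
          have hj0par : PySem.List.pyGetD par j0 0 = 0 := by
            rw [hpar j0 hj0nn hj0n, if_neg (by rintro ⟨-, hh, -⟩; exact hj0pl hh)]
          have hj0lt : ∀ y ∈ rest, j0 < y := by
            have := hPW; rw [hdwe] at this
            exact (List.pairwise_cons.mp this).1
          by_cases hj0k : j0 < (k : Int)
          · -- matched: both use j0
            have hfind : (PySem.List.pyRange (max 0 ((k : Int) - w)) (k : Int) 1).find?
                (fun j => decide (PySem.List.pyGetD tl j 0 = 1 ∧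
                  PySem.List.pyGetD vis j 0 = 0 ∧ PySem.List.pyGetD par j 0 = 0)) = some j0 := by
              have hmin : ∀ y : Int, max 0 ((k : Int) - w) ≤ y → y < j0 →
                  decide (PySem.List.pyGetD tl y 0 = 1 ∧
                    PySem.List.pyGetD vis y 0 = 0 ∧
                    PySem.List.pyGetD par y 0 = 0) = false := by
                intro y hy1 hy2
                rw [decide_eq_false_iff_not]
                rintro ⟨h1, h2, h3⟩
                have hy := hcand y hy1 (lt_trans hy2 hj0k) h1 h2 h3
                rw [hdwe] at hy
                rcases List.mem_cons.mp hy with rfl | hyrest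
                · omega
                · have := hj0lt y hyrest; omega
              exact pvFindMin _ j0 (j0 - max 0 ((k : Int) - w)).toNat _ _ rfl
                (max_le hj0nn hj0ge) hj0k (by simp [hj0tl, hj0vis, hj0par]) hmin
            have hA : pvStepA tl w (vis, par, adjA) ((k : Int), p) =
                (PySem.List.pySetD vis j0 1, par,
                 PySem.List.pySetD (PySem.List.pySetD adjA j0 0) ((k : Nat) : Int) 1) := by
              simp only [pvStepA]; rw [if_neg hc1, if_pos ⟨hp1, htl0⟩, hfind]
            have hB : pvStepB tl w (cs, adjA) ((k : Int), p) =
                (rest, PySem.List.pySetD (PySem.List.pySetD adjA j0 0) ((k : Nat) : Int) 1) := by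
              simp only [pvStepB]; rw [if_pos ⟨hp1, htl0⟩, hdwe]
              simp [hj0k]
            rw [hA, hB]
            have hj0vislen : j0 < (vis.length : Int) := by rw [hvl]; exact hj0n
            refine ⟨rfl, by simp [PySem.List.length_pySetD, hvl],
              hparl, by simp [PySem.List.length_pySetD, hal],
              parExt (by rintro ⟨-, h⟩; exact htl1 h),
              (D ++ cs.takeWhile (fun j => decide (j < (k : Int) - w))) ++ [j0],
              by rw [hCsplit, hdwe]; simp, ?_, ?_, ?_⟩
            · intro j hjrest
              have hjcs : j ∈ cs := haux j (by rw [hdwe]; exact List.mem_cons_of_mem _ hjrest)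
              have hjnn : 0 ≤ j := hCnn j (by rw [hC]; exact List.mem_append_right _ hjcs)
              rw [pvGetSetD vis j0 j 1 0 hj0nn hjnn hj0vislen,
                if_neg (by have := hj0lt j hjrest; omega)]
              exact hcsvis j hjcs
            · intro j hj
              rcases List.mem_append.mp hj with hjDt | hjj0
              · rcases List.mem_append.mp hjDt with hjD | hjt
                · rcases hDvis j hjD with hne | hexp
                  · left
                    have hjnn : 0 ≤ j := hCnn j (by rw [hC]; exact List.mem_append_left _ hjD)
                    rw [pvGetSetD vis j0 j 1 0 hj0nn hjnn hj0vislen]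
                    split_ifs with hh
                    · norm_num
                    · exact hne
                  · right; push_cast; omega
                · right; have := ht j hjt; push_cast; omega
              · left
                rcases List.mem_singleton.mp hjj0 with rfl
                rw [pvGetSetD vis j j 1 0 hj0nn hj0nn hj0vislen, if_pos rfl]
                norm_num
            · intro j h0 hj hne
              rw [pvGetSetD vis j0 j 1 0 hj0nn h0 hj0vislen] at hne
              rcases eq_or_ne j j0 with rfl | hjne
              · exact List.mem_append_right _ (List.mem_singleton.mpr rfl)
              · rw [if_neg hjne] at hne
                exact List.mem_append_left _ (List.mem_append_left _ (hvisD j h0 hj hne))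
          · -- head of the candidate suffix is not yet reachable: nothing matches
            have hfind : (PySem.List.pyRange (max 0 ((k : Int) - w)) (k : Int) 1).find?
                (fun j => decide (PySem.List.pyGetD tl j 0 = 1 ∧
                  PySem.List.pyGetD vis j 0 = 0 ∧ PySem.List.pyGetD par j 0 = 0)) = none := by
              apply pvFindNone
              intro y hy1 hy2
              rw [decide_eq_false_iff_not]
              rintro ⟨h1, h2, h3⟩
              have hy := hcand y hy1 hy2 h1 h2 h3
              rw [hdwe] at hy
              rcases List.mem_cons.mp hy with rfl | hyrest
              · omega
              · have := hj0lt y hyrest; omega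
            have hA : pvStepA tl w (vis, par, adjA) ((k : Int), p) = (vis, par, adjA) := by
              simp only [pvStepA]; rw [if_neg hc1, if_pos ⟨hp1, htl0⟩, hfind]
            have hB : pvStepB tl w (cs, adjA) ((k : Int), p) = (j0 :: rest, adjA) := by
              simp only [pvStepB]; rw [if_pos ⟨hp1, htl0⟩, hdwe]
              simp [hj0k]
            rw [hA, hB]
            refine ⟨rfl, hvl, hparl, hal, parExt (by rintro ⟨-, h⟩; exact htl1 h),
              D ++ cs.takeWhile (fun j => decide (j < (k : Int) - w)),
              by rw [hCsplit, hdwe], ?_, ?_,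
              fun j h0 hj hne => List.mem_append_left _ (hvisD j h0 hj hne)⟩
            · intro j hj
              exact hcsvis j (haux j (by rw [hdwe]; exact hj))
            · intro j hj
              rcases List.mem_append.mp hj with hjD | hjt
              · exact dWeak j hjD
              · right; have := ht j hjt; push_cast; omega
      · -- p = 1 but true label is neither 0 nor 1: both machines idle
        have hA : pvStepA tl w (vis, par, adjA) ((k : Int), p) = (vis, par, adjA) := by
          simp only [pvStepA]
          rw [if_neg (by rintro ⟨-, h⟩; exact htl1 h),
            if_neg (by rintro ⟨-, h⟩; exact htl0 h)]
        have hB : pvStepB tl w (cs, adjA) ((k : Int), p) = (cs, adjA) := by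
          simp only [pvStepB]; rw [if_neg (by rintro ⟨-, h⟩; exact htl0 h)]
        rw [hA, hB]
        exact ⟨rfl, hvl, hparl, hal,
          parExt (by rintro ⟨-, h⟩; exact htl1 h), D, hC, hcsvis, dWeak, hvisD⟩
  · -- p ≠ 1: both machines idle
    have hA : pvStepA tl w (vis, par, adjA) ((k : Int), p) = (vis, par, adjA) := by
      simp only [pvStepA]
      rw [if_neg (by rintro ⟨h, -⟩; exact hp1 h), if_neg (by rintro ⟨h, -⟩; exact hp1 h)]
    have hB : pvStepB tl w (cs, adjA) ((k : Int), p) = (cs, adjA) := by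
      simp only [pvStepB]; rw [if_neg (by rintro ⟨h, -⟩; exact hp1 h)]
    rw [hA, hB]
    exact ⟨rfl, hvl, hparl, hal,
      parExt (by rintro ⟨h, -⟩; rw [hplk] at h; exact hp1 h), D, hC, hcsvis, dWeak, hvisD⟩

-- folding the enumerated suffix keeps the two adjusted lists equal
lemma pvLoop (pl tl : List Int) (w : Int) (hlen : pl.length = tl.length) :
    ∀ (suf : List Int) (k : Nat), suf = pl.drop k →
    ∀ vis par adjA cs adjB, pvInv pl tl w k vis par adjA cs adjB →
    ((PySem.List.enumerate suf (k : Int)).foldl (pvStepA tl w) (vis, par, adjA)).2.2 =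
    ((PySem.List.enumerate suf (k : Int)).foldl (pvStepB tl w) (cs, adjB)).2 := by
  intro suf
  induction suf with
  | nil => intro k _ vis par adjA cs adjB hinv; simpa [PySem.List.enumerate] using hinv.1
  | cons p rest ih =>
      intro k hsuf vis par adjA cs adjB hinv
      have hk : k < pl.length := by
        by_contra hge
        rw [List.drop_eq_nil_of_le (by omega)] at hsuf
        exact List.cons_ne_nil _ _ hsuf
      have hdrop := List.drop_eq_getElem_cons hk
      rw [hdrop] at hsuf
      have hp : pl.getD k 0 = p := by
        have := hsuf
        cases this
        simp [List.getD_eq_getElem?_getD, List.getElem?_eq_getElem hk]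
      have hrest : rest = pl.drop (k + 1) := by cases hsuf; rfl
      rw [PySem.List.enumerate_cons]
      simp only [List.foldl_cons]
      have hstep := pvStep pl tl w k p hlen hk hp vis par adjA cs adjB hinv
      have hcast : (k : Int) + 1 = ((k + 1 : Nat) : Int) := by push_cast; ring
      rw [hcast]
      exact ih (k + 1) hrest _ _ _ _ _ hstep

-- ===== VERDICT (by name: the statement is the Claim_ definition above) =====
theorem align_labels_spec : Claim_equal_align_labels := by
  intro pl tl w _ hpre
  unfold Spec_align_labels align_labels align_labels_alt
  have hlen : pl.length = tl.length := hpre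
  rw [if_neg (by omega), if_neg (by omega)]
  refine pvLoop pl tl w hlen pl 0 rfl _ _ _ _ _ ?_
  refine ⟨rfl, by simpa using hlen, by simpa using hlen, rfl, ?_, [], by simp, ?_, by simp, ?_⟩
  · intro j h0 hj
    rw [if_neg (by intro h; omega)]
    lift j to ℕ using h0
    simp [PySem.List.pyGetD_natCast, List.getD_eq_getElem?_getD]
  · intro j hj
    lift j to ℕ using ((pvMemCands pl tl j).mp hj).1
    simp [PySem.List.pyGetD_natCast, List.getD_eq_getElem?_getD]
  · intro j h0 hj hne
    exfalso; apply hne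
    lift j to ℕ using h0
    simp [PySem.List.pyGetD_natCast, List.getD_eq_getElem?_getD]
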